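-- pv_equiv track=rewrite | github.com/ana-jakovljevic/maximum-common-subtree | tree.py | check_matrix
-- ===== SOURCE A (Python) =====
-- def check_matrix(matrix,lst):
--     row = matrix[0]
--     for idx in range(len(row)):
--         if not row[idx] in lst:
--             if len(matrix) == 1:
--                 return True
--
--             lst.append(row[idx])
--             value = check_matrix(matrix[1:],lst)
--             if value == True:
--                 return True
--             else:
--                 lst.pop()
--     return False
-- ===== SOURCE B (Python) =====
-- def check_matrix(matrix, lst):
--     # Bipartite matching (Kuhn's augmenting paths): rows vs distinct allowed values.
--     # Does not mutate lst (A appends chosen values to lst when it returns True).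
--     forbidden = set(lst)
--     match = {}  # value -> row index
--
--     def try_row(i, visited):
--         for v in matrix[i]:
--             if v not in forbidden and v not in visited:
--                 visited.add(v)
--                 if v not in match or try_row(match[v], visited):
--                     match[v] = i
--                     return True
--         return False
--
--     return all(try_row(i, set()) for i in range(len(matrix)))
-- ===== Notes on version B (the rewrite author's own statement) =====
-- stated objective: faster
-- what changed: Replaced A's exponential backtracking over value choices (re-exploring permutations of assignments) by Kuhn's augmenting-path bipartite matching between rows and distinct allowed values, which decides SDR existence in polynomial time.
import Mathlib
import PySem

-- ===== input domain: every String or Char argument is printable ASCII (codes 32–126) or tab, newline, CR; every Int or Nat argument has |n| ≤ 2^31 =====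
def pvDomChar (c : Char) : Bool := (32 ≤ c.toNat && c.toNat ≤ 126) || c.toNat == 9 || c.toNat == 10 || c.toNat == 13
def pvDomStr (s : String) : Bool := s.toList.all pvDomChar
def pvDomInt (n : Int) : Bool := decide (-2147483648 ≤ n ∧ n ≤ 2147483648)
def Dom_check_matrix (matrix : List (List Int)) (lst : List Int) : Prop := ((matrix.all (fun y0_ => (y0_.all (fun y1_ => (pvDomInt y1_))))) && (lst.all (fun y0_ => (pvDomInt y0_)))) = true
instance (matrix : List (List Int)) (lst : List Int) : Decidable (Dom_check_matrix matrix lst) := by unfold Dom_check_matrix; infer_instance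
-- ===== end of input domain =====

-- B replaces A's exponential backtracking over value choices by Kuhn's augmenting-path
-- bipartite matching (rows vs distinct allowed values); equivalence is about the RETURN
-- value only (A appends the chosen values to lst when it returns True, B never mutates lst).

-- ===== PORT A =====
-- A: backtracking; picks a value of row 0 not in lst, recurses on the remaining rows.
-- check_matrix [] lst: Python raises IndexError (matrix[0]); excluded by Pre_; the port returns false there.
mutual
def check_matrix (matrix : List (List Int)) (lst : List Int) : Bool :=
  match matrix with
  | [] => false
  | row :: rest => chkA row rest lst
termination_by (matrix.length, 0)

-- the 'for idx in range(len(row))' loop of A, iterating the first row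
def chkA (row : List Int) (rest : List (List Int)) (lst : List Int) : Bool :=
  match row with
  | [] => false
  | v :: vs =>
    if v ∈ lst then chkA vs rest lst
    else if rest.isEmpty then true
    else if check_matrix rest (lst ++ [v]) then true
    else chkA vs rest lst
termination_by (rest.length, row.length + 1)
end

-- ===== PORT B =====
-- Source B's try_row: iterates 'row' (the remaining suffix of matrix[i]); 'fuel' is a
-- totality guard for the augmenting recursion (never exhausted: tryAux_isSome below).
def tryAux (matrix : List (List Int)) (forbidden : PySem.Set Int) (i : Nat) (fuel : Nat)
    (row : List Int) (visited : PySem.Set Int) (mtch : PySem.Dict Int Nat) :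
    Option (Bool × PySem.Set Int × PySem.Dict Int Nat) :=
  match row with
  | [] => some (false, visited, mtch)
  | v :: vs =>
    if PySem.Set.contains forbidden v || PySem.Set.contains visited v then
      tryAux matrix forbidden i fuel vs visited mtch
    else
      match mtch.get? v with
      | none => some (true, PySem.Set.add visited v, mtch.insert v i)
      | some j =>
        match fuel with
        | 0 => none
        | fuel' + 1 =>
          match tryAux matrix forbidden j fuel' (matrix.getD j []) (PySem.Set.add visited v) mtch with
          | none => none
          | some (true, vis3, m3) => some (true, vis3, m3.insert v i)
          | some (false, vis3, m3) => tryAux matrix forbidden i (fuel' + 1) vs vis3 m3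
termination_by (fuel, row.length)

-- Source B's 'all(try_row(i, set()) for i in range(len(matrix)))' (lazy: stops at the first False)
def kuhnLoop (matrix : List (List Int)) (forbidden : PySem.Set Int) (fuel : Nat) :
    List Nat → PySem.Dict Int Nat → Bool
  | [], _ => true
  | i :: is, mtch =>
    match tryAux matrix forbidden i fuel (matrix.getD i []) PySem.Set.empty mtch with
    | some (true, _, m2) => kuhnLoop matrix forbidden fuel is m2
    | _ => false

def check_matrix_alt (matrix : List (List Int)) (lst : List Int) : Bool :=
  kuhnLoop matrix (PySem.Set.ofList lst) (matrix.flatten.length + 1)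
    (List.range matrix.length) PySem.Dict.empty

-- ===== PRECONDITION & SPEC =====
-- Pre_ excludes only the empty matrix, on which Python A raises IndexError (matrix[0]).
def Pre_check_matrix (matrix : List (List Int)) (lst : List Int) : Prop := matrix ≠ []
instance (matrix : List (List Int)) (lst : List Int) : Decidable (Pre_check_matrix matrix lst) := by unfold Pre_check_matrix; infer_instance
def pvWitness_check_matrix : List (List Int) × List Int := ([[1]], [])

def Spec_check_matrix (matrix : List (List Int)) (lst : List Int) (out : Bool) : Prop := out = check_matrix_alt matrix lst
instance (matrix : List (List Int)) (lst : List Int) (out : Bool) : Decidable (Spec_check_matrix matrix lst out) := by unfold Spec_check_matrix; infer_instance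

-- ===== CLAIM (what is proved, stated in full; the proofs are below) =====
def Claim_equal_check_matrix : Prop := ∀ (matrix : List (List Int)) (lst : List Int), Dom_check_matrix matrix lst → Pre_check_matrix matrix lst → Spec_check_matrix matrix lst (check_matrix matrix lst)

-- ===== LEMMAS AND PROOFS =====

-- The common specification: a system of distinct representatives (SDR), first in the
-- accumulator form that mirrors A's recursion, then in the selection-list form used
-- for the matching side.
def Sdr : List (List Int) → List Int → Prop
  | [], _ => True
  | row :: rest, lst => ∃ v, v ∈ row ∧ v ∉ lst ∧ Sdr rest (lst ++ [v])

def GSdr (matrix : List (List Int)) (lst : List Int) : Prop :=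
  ∃ sel : List Int, sel.length = matrix.length ∧ sel.Nodup ∧ (∀ v ∈ sel, v ∉ lst) ∧
    ∀ r, r < matrix.length → sel.getD r 0 ∈ matrix.getD r []

theorem chkA_iff (rest : List (List Int)) : ∀ (row : List Int) (lst : List Int),
    chkA row rest lst = true ↔ ∃ v, v ∈ row ∧ v ∉ lst ∧ Sdr rest (lst ++ [v]) := by
  induction rest with
  | nil =>
    intro row lst
    induction row with
    | nil => simp [chkA]
    | cons v vs ih =>
      rw [chkA]
      by_cases hv : v ∈ lst
      · simp [hv, ih, Sdr]
      · simp [hv, Sdr]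
  | cons row2 rest2 ih =>
    intro row lst
    induction row with
    | nil => simp [chkA]
    | cons v vs ihrow =>
      have hcm : ∀ l, check_matrix (row2 :: rest2) l = true ↔ Sdr (row2 :: rest2) l := by
        intro l; rw [check_matrix]; rw [ih row2 l]; simp [Sdr]
      rw [chkA]
      by_cases hv : v ∈ lst
      · simp only [hv, if_true]
        rw [ihrow]
        constructor
        · rintro ⟨u, hu, h1, h2⟩; exact ⟨u, List.mem_cons_of_mem _ hu, h1, h2⟩
        · rintro ⟨u, hu, h1, h2⟩
          rcases List.mem_cons.1 hu with rfl | hu'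
          · exact absurd hv h1
          · exact ⟨u, hu', h1, h2⟩
      · simp only [hv, if_false, List.isEmpty_cons]
        by_cases hc : check_matrix (row2 :: rest2) (lst ++ [v]) = true
        · simp only [hc, if_true, Bool.false_eq_true, if_false, true_iff]
          exact ⟨v, List.mem_cons_self, hv, (hcm _).1 hc⟩
        · simp only [hc, Bool.false_eq_true, if_false]
          rw [ihrow]
          constructor
          · rintro ⟨u, hu, h1, h2⟩; exact ⟨u, List.mem_cons_of_mem _ hu, h1, h2⟩
          · rintro ⟨u, hu, h1, h2⟩
            rcases List.mem_cons.1 hu with rfl | hu'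
            · exact absurd ((hcm _).2 h2) hc
            · exact ⟨u, hu', h1, h2⟩

theorem check_matrix_iff (matrix : List (List Int)) (lst : List Int) (h : matrix ≠ []) :
    check_matrix matrix lst = true ↔ Sdr matrix lst := by
  match matrix with
  | [] => exact absurd rfl h
  | row :: rest => rw [check_matrix, chkA_iff]; simp [Sdr]

theorem sdr_iff_gsdr (matrix : List (List Int)) (lst : List Int) :
    Sdr matrix lst ↔ GSdr matrix lst := by
  induction matrix generalizing lst with
  | nil =>
    simp only [Sdr, GSdr, true_iff]
    exact ⟨[], rfl, List.nodup_nil, by simp, by simp⟩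
  | cons row rest ih =>
    constructor
    · rintro ⟨v, hvrow, hvlst, hsdr⟩
      obtain ⟨sel', hlen, hnd, hforb, hmem⟩ := (ih _).1 hsdr
      refine ⟨v :: sel', by simp [hlen], ?_, ?_, ?_⟩
      · refine List.nodup_cons.2 ⟨fun hvin => ?_, hnd⟩
        exact hforb v hvin (by simp)
      · intro u hu
        rcases List.mem_cons.1 hu with rfl | hu'
        · exact hvlst
        · intro hul; exact hforb u hu' (by simp [hul])
      · intro r hr
        cases r with
        | zero => simpa using hvrow
        | succ r' => simpa using hmem r' (by simpa using hr)
    · rintro ⟨sel, hlen, hnd, hforb, hmem⟩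
      match sel, hlen with
      | v :: sel', hlen =>
        have hv0 : v ∈ row := by simpa using hmem 0 (by simp)
        refine ⟨v, hv0, hforb v (by simp), (ih _).2 ⟨sel', by simpa using hlen, (List.nodup_cons.1 hnd).2, ?_, ?_⟩⟩
        · intro u hu hul
          rcases List.mem_append.1 hul with h1 | h1
          · exact hforb u (List.mem_cons_of_mem _ hu) h1
          · simp at h1; subst h1; exact (List.nodup_cons.1 hnd).1 hu
        · intro r hr
          simpa using hmem (r+1) (by simpa using hr)
theorem tryAux_nil (matrix : List (List Int)) (forbidden : PySem.Set Int) (i fuel : Nat)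
    (vis : PySem.Set Int) (M : PySem.Dict Int Nat) :
    tryAux matrix forbidden i fuel [] vis M = some (false, vis, M) := by rw [tryAux]

theorem tryAux_cons_skip (matrix : List (List Int)) (forbidden : PySem.Set Int) (i fuel : Nat)
    (v : Int) (vs : List Int) (vis : PySem.Set Int) (M : PySem.Dict Int Nat)
    (h : (PySem.Set.contains forbidden v || PySem.Set.contains vis v) = true) :
    tryAux matrix forbidden i fuel (v :: vs) vis M = tryAux matrix forbidden i fuel vs vis M := by
  rw [tryAux, if_pos h]

theorem tryAux_cons_new (matrix : List (List Int)) (forbidden : PySem.Set Int) (i fuel : Nat)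
    (v : Int) (vs : List Int) (vis : PySem.Set Int) (M : PySem.Dict Int Nat)
    (h : ¬ (PySem.Set.contains forbidden v || PySem.Set.contains vis v) = true)
    (hg : M.get? v = none) :
    tryAux matrix forbidden i fuel (v :: vs) vis M
      = some (true, PySem.Set.add vis v, M.insert v i) := by
  rw [tryAux, if_neg h, hg]

theorem tryAux_cons_matched_zero (matrix : List (List Int)) (forbidden : PySem.Set Int) (i : Nat)
    (v : Int) (vs : List Int) (vis : PySem.Set Int) (M : PySem.Dict Int Nat) (j : Nat)
    (h : ¬ (PySem.Set.contains forbidden v || PySem.Set.contains vis v) = true)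
    (hg : M.get? v = some j) :
    tryAux matrix forbidden i 0 (v :: vs) vis M = none := by
  rw [tryAux, if_neg h, hg]

theorem tryAux_cons_matched_succ (matrix : List (List Int)) (forbidden : PySem.Set Int)
    (i fuel' : Nat) (v : Int) (vs : List Int) (vis : PySem.Set Int) (M : PySem.Dict Int Nat)
    (j : Nat)
    (h : ¬ (PySem.Set.contains forbidden v || PySem.Set.contains vis v) = true)
    (hg : M.get? v = some j) :
    tryAux matrix forbidden i (fuel' + 1) (v :: vs) vis M
      = match tryAux matrix forbidden j fuel' (matrix.getD j []) (PySem.Set.add vis v) M with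
        | none => none
        | some (true, vis3, m3) => some (true, vis3, m3.insert v i)
        | some (false, vis3, m3) => tryAux matrix forbidden i (fuel' + 1) vs vis3 m3 := by
  rw [tryAux, if_neg h, hg]
theorem tryAux_mono (matrix : List (List Int)) (lst : List Int) : ∀ (fuel : Nat)
    (row : List Int) (i : Nat) (vis : PySem.Set Int) (M : PySem.Dict Int Nat)
    (res : Bool × PySem.Set Int × PySem.Dict Int Nat),
    tryAux matrix (PySem.Set.ofList lst) i fuel row vis M = some res →
    (∀ x ∈ vis, x ∈ res.2.1) ∧ (∀ k : Int, k ∈ vis → res.2.2.get? k = M.get? k) ∧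
      (vis.Nodup → res.2.1.Nodup) := by
  intro fuel
  induction fuel using Nat.strong_induction_on with
  | _ fuel ihf =>
  intro row
  induction row with
  | nil =>
    intro i vis M res h
    rw [tryAux_nil] at h
    injection h with h
    subst h
    exact ⟨fun x hx => hx, fun k _ => rfl, fun h => h⟩
  | cons v vs ihrow =>
    intro i vis M res h
    by_cases hskip : (PySem.Set.contains (PySem.Set.ofList lst) v || PySem.Set.contains vis v) = true
    · rw [tryAux_cons_skip _ _ _ _ _ _ _ _ hskip] at h
      exact ihrow i vis M res h
    · have hskip' : ¬(v ∈ lst ∨ v ∈ vis) := by simpa using hskip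
      have hvnin : v ∉ vis := fun hv => hskip' (Or.inr hv)
      cases hg : M.get? v with
      | none =>
        rw [tryAux_cons_new _ _ _ _ _ _ _ _ hskip hg] at h
        injection h with h
        subst h
        refine ⟨fun x hx => (PySem.Set.mem_add _ _ _).2 (Or.inl hx), fun k hk => ?_,
          fun hnd => PySem.Set.nodup_add _ _ hnd⟩
        exact PySem.Dict.get?_insert_of_ne _ _ (fun (he : k = v) => hvnin (he ▸ hk))
      | some j =>
        cases fuel with
        | zero =>
          rw [tryAux_cons_matched_zero _ _ _ _ _ _ _ _ hskip hg] at h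
          cases h
        | succ fuel' =>
          rw [tryAux_cons_matched_succ _ _ _ _ _ _ _ _ _ hskip hg] at h
          cases hr : tryAux matrix (PySem.Set.ofList lst) j fuel' (matrix.getD j []) (PySem.Set.add vis v) M with
          | none => rw [hr] at h; simp at h
          | some r2 =>
            obtain ⟨b2, vis3, m3⟩ := r2
            have hsub := ihf fuel' (Nat.lt_succ_self _) (matrix.getD j []) j (PySem.Set.add vis v) M (b2, vis3, m3) hr
            cases b2 with
            | true =>
              simp only [hr] at h
              injection h with h
              subst h
              refine ⟨fun x hx => hsub.1 x ((PySem.Set.mem_add _ _ _).2 (Or.inl hx)), fun k hk => ?_,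
                fun hnd => hsub.2.2 (PySem.Set.nodup_add _ _ hnd)⟩
              rw [PySem.Dict.get?_insert_of_ne _ _ (fun (he : k = v) => hvnin (he ▸ hk))]
              exact hsub.2.1 k ((PySem.Set.mem_add _ _ _).2 (Or.inl hk))
            | false =>
              simp only [hr] at h
              have hcont := ihrow i vis3 m3 res h
              refine ⟨fun x hx => hcont.1 x (hsub.1 x ((PySem.Set.mem_add _ _ _).2 (Or.inl hx))),
                fun k hk => ?_,
                fun hnd => hcont.2.2 (hsub.2.2 (PySem.Set.nodup_add _ _ hnd))⟩
              rw [hcont.2.1 k (hsub.1 k ((PySem.Set.mem_add _ _ _).2 (Or.inl hk)))]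
              exact hsub.2.1 k ((PySem.Set.mem_add _ _ _).2 (Or.inl hk))
theorem tryAux_false (matrix : List (List Int)) (lst : List Int) : ∀ (fuel : Nat)
    (row : List Int) (i : Nat) (vis vis' : PySem.Set Int) (M M' : PySem.Dict Int Nat),
    tryAux matrix (PySem.Set.ofList lst) i fuel row vis M = some (false, vis', M') →
    M' = M ∧ (∀ x ∈ vis, x ∈ vis') ∧
      (∀ v ∈ row, v ∉ lst → v ∈ vis') ∧
      (∀ w, w ∈ vis' → w ∉ vis →
        ∃ j, M.get? w = some j ∧ ∀ u ∈ matrix.getD j [], u ∉ lst → u ∈ vis') := by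
  intro fuel
  induction fuel using Nat.strong_induction_on with
  | _ fuel ihf =>
  intro row
  induction row with
  | nil =>
    intro i vis vis' M M' h
    rw [tryAux_nil] at h
    simp only [Option.some.injEq, Prod.mk.injEq] at h
    obtain ⟨-, rfl, rfl⟩ := h
    exact ⟨rfl, fun x hx => hx, by simp, fun w hw hnw => absurd hw hnw⟩
  | cons v vs ihrow =>
    intro i vis vis' M M' h
    by_cases hskip : (PySem.Set.contains (PySem.Set.ofList lst) v || PySem.Set.contains vis v) = true
    · rw [tryAux_cons_skip _ _ _ _ _ _ _ _ hskip] at h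
      obtain ⟨h1, h2, h3, h4⟩ := ihrow i vis vis' M M' h
      refine ⟨h1, h2, ?_, h4⟩
      intro u hu hul
      rcases List.mem_cons.1 hu with rfl | hu'
      · rcases Bool.or_eq_true_iff.1 hskip with hc | hc
        · exact absurd ((PySem.Set.contains_iff _ _).1 hc |> (PySem.Set.mem_ofList _ _).1) hul
        · exact h2 u ((PySem.Set.contains_iff _ _).1 hc)
      · exact h3 u hu' hul
    · have hskip' : ¬(v ∈ lst ∨ v ∈ vis) := by simpa using hskip
      have hvnin : v ∉ vis := fun hv => hskip' (Or.inr hv)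
      cases hg : M.get? v with
      | none =>
        rw [tryAux_cons_new _ _ _ _ _ _ _ _ hskip hg] at h
        simp at h
      | some j =>
        cases fuel with
        | zero =>
          rw [tryAux_cons_matched_zero _ _ _ _ _ _ _ _ hskip hg] at h
          simp at h
        | succ fuel' =>
          rw [tryAux_cons_matched_succ _ _ _ _ _ _ _ _ _ hskip hg] at h
          cases hr : tryAux matrix (PySem.Set.ofList lst) j fuel' (matrix.getD j []) (PySem.Set.add vis v) M with
          | none => rw [hr] at h; simp at h
          | some r2 =>
            obtain ⟨b2, vis3, m3⟩ := r2
            cases b2 with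
            | true => simp only [hr] at h; simp at h
            | false =>
              simp only [hr] at h
              obtain ⟨hm3, hsub2, hsub3, hsub4⟩ := ihf fuel' (Nat.lt_succ_self _) (matrix.getD j []) j (PySem.Set.add vis v) vis3 M m3 hr
              rw [hm3] at h
              obtain ⟨h1, h2, h3, h4⟩ := ihrow i vis3 vis' M M' h
              have hvmem : v ∈ vis' := h2 v (hsub2 v ((PySem.Set.mem_add _ _ _).2 (Or.inr rfl)))
              refine ⟨h1, fun x hx => h2 x (hsub2 x ((PySem.Set.mem_add _ _ _).2 (Or.inl hx))), ?_, ?_⟩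
              · intro u hu hul
                rcases List.mem_cons.1 hu with rfl | hu'
                · exact hvmem
                · exact h3 u hu' hul
              · intro w hw hwv
                by_cases hw3 : w ∈ vis3
                · by_cases hwa : w ∈ PySem.Set.add vis v
                  · have hwv' : w = v := by
                      rcases (PySem.Set.mem_add _ _ _).1 hwa with hin | rfl
                      · exact absurd hin hwv
                      · rfl
                    subst hwv'
                    exact ⟨j, hg, fun u hu hul => h2 u (hsub3 u hu hul)⟩
                  · obtain ⟨j', hj', hcl⟩ := hsub4 w hw3 hwa
                    exact ⟨j', hj', fun u hu hul => h2 u (hcl u hu hul)⟩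
                · obtain ⟨j', hj', hcl⟩ := h4 w hw hw3
                  exact ⟨j', hj', hcl⟩
theorem replace_snd_multiset (v : Int) (i j : Nat) : ∀ (l : List (Int × Nat)),
    (l.map Prod.fst).Nodup → (v, j) ∈ l →
    ((l.map (fun p => if (p.1 == v) = true then (v, i) else p)).map Prod.snd : Multiset Nat)
      = i ::ₘ ((l.map Prod.snd : Multiset Nat).erase j) := by
  intro l
  induction l with
  | nil => intro _ h; cases h
  | cons p l ih =>
    intro hnd hmem
    have hndt : (l.map Prod.fst).Nodup := (List.nodup_cons.1 (by simpa using hnd)).2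
    have hp1nin : p.1 ∉ l.map Prod.fst := (List.nodup_cons.1 (by simpa using hnd)).1
    rcases List.mem_cons.1 hmem with rfl | hmem'
    · have hid : l.map (fun q => if (q.1 == v) = true then (v, i) else q) = l := by
        apply List.map_congr_left ?_ |>.trans (List.map_id _)
        intro q hq
        have h1 : q.1 ∈ l.map Prod.fst := List.mem_map_of_mem (f := Prod.fst) hq
        have : q.1 ≠ v := fun he => hp1nin (he ▸ h1)
        simp [this]
      simp only [List.map_cons, beq_self_eq_true, if_true, hid]
      rw [show ((i :: l.map Prod.snd : List Nat) : Multiset Nat) = i ::ₘ (l.map Prod.snd : Multiset Nat) from rfl]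
      rw [show ((j :: l.map Prod.snd : List Nat) : Multiset Nat) = j ::ₘ (l.map Prod.snd : Multiset Nat) from rfl]
      rw [Multiset.erase_cons_head]
    · have hv_in : v ∈ l.map Prod.fst := by
        have := List.mem_map_of_mem (f := Prod.fst) hmem'
        simpa using this
      have hp1 : (p.1 == v) = false := by
        by_cases h : p.1 = v
        · exact absurd (h ▸ hv_in) hp1nin
        · simp [h]
      have hj : j ∈ l.map Prod.snd := by
        have := List.mem_map_of_mem (f := Prod.snd) hmem'
        simpa using this
      simp only [List.map_cons, hp1, Bool.false_eq_true, if_false]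
      have hih := ih hndt hmem'
      rw [show ((p.2 :: (l.map (fun q => if (q.1 == v) = true then (v, i) else q)).map Prod.snd : List Nat) : Multiset Nat) = p.2 ::ₘ ((l.map (fun q => if (q.1 == v) = true then (v, i) else q)).map Prod.snd : Multiset Nat) from rfl]
      rw [hih]
      by_cases hpj : p.2 = j
      · subst hpj
        rw [show ((p.2 :: l.map Prod.snd : List Nat) : Multiset Nat) = p.2 ::ₘ (l.map Prod.snd : Multiset Nat) from rfl]
        rw [Multiset.erase_cons_head]
        rw [Multiset.cons_swap]
        congr 1
        exact Multiset.cons_erase hj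
      · rw [show ((p.2 :: l.map Prod.snd : List Nat) : Multiset Nat) = p.2 ::ₘ (l.map Prod.snd : Multiset Nat) from rfl]
        rw [Multiset.erase_cons_tail _ (by simpa using hpj)]
        rw [Multiset.cons_swap]
def PairsOk (matrix : List (List Int)) (lst : List Int) (M : PySem.Dict Int Nat) : Prop :=
  ∀ p ∈ M.items, p.1 ∈ matrix.getD p.2 [] ∧ p.1 ∉ lst ∧ p.2 < matrix.length

theorem values_insert_new (M : PySem.Dict Int Nat) (v : Int) (i : Nat)
    (hg : M.get? v = none) :
    ((M.insert v i).values : Multiset Nat) = i ::ₘ (M.values : Multiset Nat) := by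
  have hc : M.contains v = false := by rw [PySem.Dict.contains_eq_isSome_get?, hg]; rfl
  simp only [PySem.Dict.values, PySem.Dict.items_insert_of_not_contains _ _ hc, List.map_append]
  rw [show ((M.items.map (·.2) ++ [(v, i)].map (·.2) : List Nat) : Multiset Nat)
      = (M.items.map (·.2) : Multiset Nat) + ([(v, i)].map (·.2) : Multiset Nat) from rfl]
  simp [add_comm]

theorem values_insert_existing (M : PySem.Dict Int Nat) (v : Int) (i j : Nat)
    (hk : M.keys.Nodup) (hg : M.get? v = some j) :
    ((M.insert v i).values : Multiset Nat) = i ::ₘ ((M.values : Multiset Nat).erase j) := by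
  have hc : M.contains v = true := by rw [PySem.Dict.contains_eq_isSome_get?, hg]; rfl
  have hnd : (M.items.map Prod.fst).Nodup := by
    simpa only [PySem.Dict.keys] using hk
  have hmem : (v, j) ∈ M.items := PySem.Dict.mem_items_of_get?_eq_some _ hg
  simp only [PySem.Dict.values, PySem.Dict.items_insert_of_contains _ _ hc]
  exact replace_snd_multiset v i j M.items hnd hmem

theorem tryAux_true (matrix : List (List Int)) (lst : List Int) : ∀ (fuel : Nat)
    (row : List Int) (i : Nat) (vis vis' : PySem.Set Int) (M M' : PySem.Dict Int Nat),
    M.keys.Nodup → PairsOk matrix lst M →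
    (∀ v ∈ row, v ∈ matrix.getD i []) → i < matrix.length →
    tryAux matrix (PySem.Set.ofList lst) i fuel row vis M = some (true, vis', M') →
    M'.keys.Nodup ∧ PairsOk matrix lst M' ∧
      (M'.values : Multiset Nat) = i ::ₘ (M.values : Multiset Nat) := by
  intro fuel
  induction fuel using Nat.strong_induction_on with
  | _ fuel ihf =>
  intro row
  induction row with
  | nil =>
    intro i vis vis' M M' _ _ _ _ h
    rw [tryAux_nil] at h
    simp at h
  | cons v vs ihrow =>
    intro i vis vis' M M' hk hp hrow hi h
    by_cases hskip : (PySem.Set.contains (PySem.Set.ofList lst) v || PySem.Set.contains vis v) = true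
    · rw [tryAux_cons_skip _ _ _ _ _ _ _ _ hskip] at h
      exact ihrow i vis vis' M M' hk hp (fun u hu => hrow u (List.mem_cons_of_mem _ hu)) hi h
    · have hskip' : ¬(v ∈ lst ∨ v ∈ vis) := by simpa using hskip
      have hvlst : v ∉ lst := fun hv => hskip' (Or.inl hv)
      cases hg : M.get? v with
      | none =>
        rw [tryAux_cons_new _ _ _ _ _ _ _ _ hskip hg] at h
        simp only [Option.some.injEq, Prod.mk.injEq] at h
        obtain ⟨-, rfl, rfl⟩ := h
        refine ⟨PySem.Dict.nodup_keys_insert _ _ _ hk, ?_, values_insert_new M v i hg⟩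
        intro p hpmem
        rcases (PySem.Dict.mem_items_insert _ _ _ _).1 hpmem with rfl | ⟨hpold, -⟩
        · exact ⟨hrow v List.mem_cons_self, hvlst, hi⟩
        · exact hp p hpold
      | some j =>
        cases fuel with
        | zero =>
          rw [tryAux_cons_matched_zero _ _ _ _ _ _ _ _ hskip hg] at h
          simp at h
        | succ fuel' =>
          rw [tryAux_cons_matched_succ _ _ _ _ _ _ _ _ _ hskip hg] at h
          cases hr : tryAux matrix (PySem.Set.ofList lst) j fuel' (matrix.getD j []) (PySem.Set.add vis v) M with
          | none => rw [hr] at h; simp at h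
          | some r2 =>
            obtain ⟨b2, vis3, m3⟩ := r2
            cases b2 with
            | false =>
              simp only [hr] at h
              have hm3 := (tryAux_false matrix lst fuel' (matrix.getD j []) j (PySem.Set.add vis v) vis3 M m3 hr).1
              rw [hm3] at h
              exact ihrow i vis3 vis' M M' hk hp (fun u hu => hrow u (List.mem_cons_of_mem _ hu)) hi h
            | true =>
              simp only [hr] at h
              simp only [Option.some.injEq, Prod.mk.injEq] at h
              obtain ⟨-, rfl, rfl⟩ := h
              have hmemj : (v, j) ∈ M.items := PySem.Dict.mem_items_of_get?_eq_some _ hg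
              have hj : j < matrix.length := (hp _ hmemj).2.2
              obtain ⟨m3k, m3p, m3v⟩ := ihf fuel' (Nat.lt_succ_self _) (matrix.getD j []) j
                (PySem.Set.add vis v) vis3 M m3 hk hp (fun u hu => hu) hj hr
              have m3get : m3.get? v = some j := by
                have := (tryAux_mono matrix lst fuel' (matrix.getD j []) j (PySem.Set.add vis v) M
                  (true, vis3, m3) hr).2.1 v ((PySem.Set.mem_add _ _ _).2 (Or.inr rfl))
                rw [this, hg]
              refine ⟨PySem.Dict.nodup_keys_insert _ _ _ m3k, ?_, ?_⟩
              · intro p hpmem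
                rcases (PySem.Dict.mem_items_insert _ _ _ _).1 hpmem with rfl | ⟨hpold, -⟩
                · exact ⟨hrow v List.mem_cons_self, hvlst, hi⟩
                · exact m3p p hpold
              · rw [values_insert_existing m3 v i j m3k m3get, m3v, Multiset.erase_cons_head]
def capVals (matrix : List (List Int)) (vis : PySem.Set Int) : Nat :=
  (PySem.List.dedup matrix.flatten).countP (fun u => decide (u ∉ vis))

theorem capVals_mono (matrix : List (List Int)) (vis vis'' : PySem.Set Int)
    (h : ∀ x ∈ vis, x ∈ vis'') : capVals matrix vis'' ≤ capVals matrix vis := by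
  apply List.countP_mono_left
  intro u _
  simp only [decide_eq_true_eq]
  exact fun hnin hin => hnin (h u hin)

theorem capVals_lt_add (matrix : List (List Int)) (vis : PySem.Set Int) (v : Int)
    (hvmem : v ∈ matrix.flatten) (hv : v ∉ vis) :
    capVals matrix (vis.add v) < capVals matrix vis := by
  obtain ⟨l1, l2, hl⟩ := List.mem_iff_append.1 ((PySem.List.mem_dedup _ _).2 hvmem)
  unfold capVals
  rw [hl]
  simp only [List.countP_append, List.countP_cons]
  have h1 : (fun u => decide (u ∉ vis.add v)) v = false := by
    simp [(PySem.Set.mem_add _ _ _).2 (Or.inr rfl)]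
  have h2 : (fun u => decide (u ∉ vis)) v = true := by simp [hv]
  have h3 : ∀ l' : List Int, l'.countP (fun u => decide (u ∉ vis.add v)) ≤ l'.countP (fun u => decide (u ∉ vis)) := by
    intro l'
    apply List.countP_mono_left
    intro u _
    simp only [decide_eq_true_eq]
    exact fun hnin hin => hnin ((PySem.Set.mem_add _ _ _).2 (Or.inl hin))
  have := h3 l1
  have := h3 l2
  rw [if_pos (show decide (v ∉ vis) = true by simp [hv]),
     if_neg (show ¬ decide (v ∉ vis.add v) = true by simp [(PySem.Set.mem_add _ _ _).2 (Or.inr rfl)])]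
  omega

theorem getD_subset_flatten (matrix : List (List Int)) (j : Nat) :
    ∀ u ∈ matrix.getD j [], u ∈ matrix.flatten := by
  intro u hu
  by_cases hj : j < matrix.length
  · rw [List.getD_eq_getElem matrix [] hj] at hu
    exact List.mem_flatten.2 ⟨matrix[j], List.getElem_mem _, hu⟩
  · rw [List.getD_eq_default matrix [] (Nat.le_of_not_lt hj)] at hu
    cases hu

theorem tryAux_isSome (matrix : List (List Int)) (lst : List Int) : ∀ (fuel : Nat)
    (row : List Int) (i : Nat) (vis : PySem.Set Int) (M : PySem.Dict Int Nat),
    (∀ v ∈ row, v ∈ matrix.flatten) → capVals matrix vis < fuel →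
    (tryAux matrix (PySem.Set.ofList lst) i fuel row vis M).isSome := by
  intro fuel
  induction fuel using Nat.strong_induction_on with
  | _ fuel ihf =>
  intro row
  induction row with
  | nil =>
    intro i vis M _ _
    rw [tryAux_nil]
    rfl
  | cons v vs ihrow =>
    intro i vis M hrow hfuel
    by_cases hskip : (PySem.Set.contains (PySem.Set.ofList lst) v || PySem.Set.contains vis v) = true
    · rw [tryAux_cons_skip _ _ _ _ _ _ _ _ hskip]
      exact ihrow i vis M (fun u hu => hrow u (List.mem_cons_of_mem _ hu)) hfuel
    · have hskip' : ¬(v ∈ lst ∨ v ∈ vis) := by simpa using hskip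
      have hvnin : v ∉ vis := fun hv => hskip' (Or.inr hv)
      cases hg : M.get? v with
      | none =>
        rw [tryAux_cons_new _ _ _ _ _ _ _ _ hskip hg]
        rfl
      | some j =>
        cases fuel with
        | zero => exact absurd hfuel (Nat.not_lt_zero _)
        | succ fuel' =>
          rw [tryAux_cons_matched_succ _ _ _ _ _ _ _ _ _ hskip hg]
          have hvflat : v ∈ matrix.flatten := hrow v List.mem_cons_self
          have hcap2 : capVals matrix (vis.add v) < fuel' :=
            Nat.lt_of_lt_of_le (capVals_lt_add matrix vis v hvflat hvnin) (Nat.lt_succ_iff.1 hfuel)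
          have hsub := ihf fuel' (Nat.lt_succ_self _) (matrix.getD j []) j (PySem.Set.add vis v) M
            (getD_subset_flatten matrix j) hcap2
          cases hr : tryAux matrix (PySem.Set.ofList lst) j fuel' (matrix.getD j []) (PySem.Set.add vis v) M with
          | none => rw [hr] at hsub; cases hsub
          | some r2 =>
            obtain ⟨b2, vis3, m3⟩ := r2
            cases b2 with
            | true => rfl
            | false =>
              have hmon := (tryAux_mono matrix lst fuel' (matrix.getD j []) j (PySem.Set.add vis v) M
                (false, vis3, m3) hr).1
              apply ihrow i vis3 m3 (fun u hu => hrow u (List.mem_cons_of_mem _ hu))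
              calc capVals matrix vis3 ≤ capVals matrix (vis.add v) :=
                    capVals_mono matrix (vis.add v) vis3 hmon
                _ < fuel' + 1 := Nat.lt_succ_of_lt hcap2
theorem no_gsdr_of_fail (matrix : List (List Int)) (lst : List Int) (k : Nat) (fuel : Nat)
    (vis' : PySem.Set Int) (M : PySem.Dict Int Nat)
    (hk : M.keys.Nodup) (hv : M.values.Nodup) (hp : PairsOk matrix lst M)
    (hkn : k < matrix.length) (hkv : k ∉ M.values)
    (h : tryAux matrix (PySem.Set.ofList lst) k fuel (matrix.getD k []) PySem.Set.empty M
         = some (false, vis', M)) :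
    ¬ GSdr matrix lst := by
  rintro ⟨sel, hlen, hnd, hforb, hmem⟩
  obtain ⟨-, -, P1, P2⟩ := tryAux_false matrix lst fuel (matrix.getD k []) k PySem.Set.empty vis' M M h
  have hval : (M.items.map Prod.snd).Nodup := by simpa [PySem.Dict.values] using hv
  have hselmem : ∀ r, r < matrix.length → sel.getD r 0 ∈ sel := by
    intro r hr
    rw [List.getD_eq_getElem sel 0 (by omega : r < sel.length)]
    exact List.getElem_mem _
  set g : Nat → Int := fun r => sel.getD r 0 with hg
  set F : Int → Nat := fun w => (M.get? w).getD 0 with hF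
  set V : Finset Int := vis'.toFinset with hV
  set Z : Finset Nat := insert k (V.image F) with hZ
  have hP2' : ∀ w ∈ vis', ∃ j, M.get? w = some j ∧ ∀ u ∈ matrix.getD j [], u ∉ lst → u ∈ vis' := by
    intro w hw
    exact P2 w hw (by simp [PySem.Set.empty])
  have hZprop : ∀ r ∈ Z, r < matrix.length ∧ g r ∈ V := by
    intro r hr
    rcases Finset.mem_insert.1 hr with rfl | hr'
    · exact ⟨hkn, List.mem_toFinset.2 (P1 _ (hmem r hkn) (hforb _ (hselmem r hkn)))⟩
    · obtain ⟨w, hw, rfl⟩ := Finset.mem_image.1 hr'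
      obtain ⟨j, hj, hcl⟩ := hP2' w (List.mem_toFinset.1 hw)
      have hFw : F w = j := by simp [hF, hj]
      have hpair := PySem.Dict.mem_items_of_get?_eq_some M hj
      have hjn : j < matrix.length := (hp _ hpair).2.2
      rw [hFw]
      exact ⟨hjn, List.mem_toFinset.2 (hcl _ (hmem j hjn) (hforb _ (hselmem j hjn)))⟩
  have hinj : Set.InjOn g Z := by
    intro r hr r' hr' heq
    have h1 := (hZprop r hr).1
    have h2 := (hZprop r' hr').1
    rw [hg] at heq
    simp only [List.getD_eq_getElem sel 0 (by omega : r < sel.length),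
      List.getD_eq_getElem sel 0 (by omega : r' < sel.length)] at heq
    exact (List.Nodup.getElem_inj_iff hnd).1 heq
  have hcard1 : Z.card ≤ V.card :=
    Finset.card_le_card_of_injOn g (fun r hr => (hZprop r hr).2) hinj
  have hFinj : Set.InjOn F V := by
    intro w hw w' hw' heq
    obtain ⟨j, hj, -⟩ := hP2' w (List.mem_toFinset.1 hw)
    obtain ⟨j', hj', -⟩ := hP2' w' (List.mem_toFinset.1 hw')
    have hFw : F w = j := by simp [hF, hj]
    have hFw' : F w' = j' := by simp [hF, hj']
    have hjj : j = j' := by rw [← hFw, ← hFw', heq]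
    subst hjj
    have hpair := PySem.Dict.mem_items_of_get?_eq_some M hj
    have hpair' := PySem.Dict.mem_items_of_get?_eq_some M hj'
    have := List.inj_on_of_nodup_map hval hpair hpair' rfl
    exact (Prod.mk.injEq .. ▸ this).1
  have hknot : k ∉ V.image F := by
    intro hkin
    obtain ⟨w, hw, hFw⟩ := Finset.mem_image.1 hkin
    obtain ⟨j, hj, -⟩ := hP2' w (List.mem_toFinset.1 hw)
    have : F w = j := by simp [hF, hj]
    rw [this] at hFw
    subst hFw
    have hpair := PySem.Dict.mem_items_of_get?_eq_some M hj
    exact hkv (by simpa [PySem.Dict.values] using List.mem_map_of_mem (f := Prod.snd) hpair)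
  have hcard2 : Z.card = V.card + 1 := by
    rw [hZ, Finset.card_insert_of_notMem hknot, Finset.card_image_of_injOn hFinj]
  omega
theorem kuhnLoop_cons (matrix : List (List Int)) (f : PySem.Set Int) (fuel : Nat) (i : Nat)
    (is : List Nat) (M : PySem.Dict Int Nat) :
    kuhnLoop matrix f fuel (i :: is) M
      = match tryAux matrix f i fuel (matrix.getD i []) PySem.Set.empty M with
        | some (true, _, m2) => kuhnLoop matrix f fuel is m2
        | _ => false := rfl

theorem capVals_empty (matrix : List (List Int)) :
    capVals matrix PySem.Set.empty = (PySem.List.dedup matrix.flatten).length := by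
  unfold capVals
  apply List.countP_eq_length.2
  intro u _
  simp [PySem.Set.empty]

theorem kuhnLoop_spec (matrix : List (List Int)) (lst : List Int) (fuel : Nat)
    (hfuel : (PySem.List.dedup matrix.flatten).length < fuel) :
    ∀ (is : List Nat) (M : PySem.Dict Int Nat),
    M.keys.Nodup → M.values.Nodup → PairsOk matrix lst M →
    (∀ i ∈ is, i < matrix.length) → is.Nodup → (∀ i ∈ is, i ∉ M.values) →
    (kuhnLoop matrix (PySem.Set.ofList lst) fuel is M = true →
      ∃ M' : PySem.Dict Int Nat, M'.keys.Nodup ∧ PairsOk matrix lst M' ∧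
        (∀ i ∈ is, i ∈ M'.values) ∧ (∀ i ∈ M.values, i ∈ M'.values)) ∧
    (GSdr matrix lst → kuhnLoop matrix (PySem.Set.ofList lst) fuel is M = true) := by
  intro is
  induction is with
  | nil =>
    intro M hk hv hp _ _ _
    exact ⟨fun _ => ⟨M, hk, hp, by simp, fun i hi => hi⟩, fun _ => rfl⟩
  | cons i is ih =>
    intro M hk hv hp his hnd hdisj
    have hin : i < matrix.length := his i List.mem_cons_self
    have hsome := tryAux_isSome matrix lst fuel (matrix.getD i []) i PySem.Set.empty M
      (getD_subset_flatten matrix i) (by rw [capVals_empty]; exact hfuel)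
    cases hr : tryAux matrix (PySem.Set.ofList lst) i fuel (matrix.getD i []) PySem.Set.empty M with
    | none => rw [hr] at hsome; cases hsome
    | some r2 =>
      obtain ⟨b, vis', M2⟩ := r2
      cases b with
      | false =>
        have hm2 : M2 = M :=
          (tryAux_false matrix lst fuel (matrix.getD i []) i PySem.Set.empty vis' M M2 hr).1
        rw [hm2] at hr
        rw [kuhnLoop_cons, hr]
        refine ⟨fun habs => absurd habs (by simp), fun hg => absurd hg ?_⟩
        exact no_gsdr_of_fail matrix lst i fuel vis' M hk hv hp hin
          (hdisj i List.mem_cons_self) hr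
      | true =>
        obtain ⟨M2k, M2p, M2val⟩ := tryAux_true matrix lst fuel (matrix.getD i []) i
          PySem.Set.empty vis' M M2 hk hp (fun u hu => hu) hin hr
        have hmem2 : ∀ x, x ∈ M2.values ↔ x = i ∨ x ∈ M.values := by
          intro x
          have : x ∈ (M2.values : Multiset Nat) ↔ x ∈ i ::ₘ (M.values : Multiset Nat) := by
            rw [M2val]
          simpa using this
        have M2v : M2.values.Nodup := by
          have : (M2.values : Multiset Nat).Nodup := by
            rw [M2val]
            exact Multiset.nodup_cons.2 ⟨by simpa using hdisj i List.mem_cons_self, by simpa using hv⟩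
          simpa using this
        have hdisj2 : ∀ i' ∈ is, i' ∉ M2.values := by
          intro i' hi' hmem
          rcases (hmem2 i').1 hmem with rfl | hold
          · exact (List.nodup_cons.1 hnd).1 hi'
          · exact hdisj i' (List.mem_cons_of_mem _ hi') hold
        obtain ⟨part1, part2⟩ := ih M2 M2k M2v M2p (fun i' hi' => his i' (List.mem_cons_of_mem _ hi'))
          (List.nodup_cons.1 hnd).2 hdisj2
        rw [kuhnLoop_cons, hr]
        constructor
        · intro ht
          obtain ⟨M', h1, h2, h3, h4⟩ := part1 ht
          refine ⟨M', h1, h2, ?_, fun x hx => h4 x ((hmem2 x).2 (Or.inr hx))⟩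
          intro r hrm
          rcases List.mem_cons.1 hrm with rfl | hr'
          · exact h4 r ((hmem2 r).2 (Or.inl rfl))
          · exact h3 r hr'
        · exact part2
theorem alt_iff (matrix : List (List Int)) (lst : List Int) :
    check_matrix_alt matrix lst = true ↔ GSdr matrix lst := by
  have hfuel : (PySem.List.dedup matrix.flatten).length < matrix.flatten.length + 1 := by
    apply Nat.lt_succ_of_le
    rw [PySem.List.dedup_eq_ofList]
    exact PySem.Set.length_ofList_le _
  have hitems : (PySem.Dict.empty : PySem.Dict Int Nat).items = [] := rfl
  have hek : (PySem.Dict.empty : PySem.Dict Int Nat).keys.Nodup := by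
    simp [PySem.Dict.keys, hitems]
  have hev : (PySem.Dict.empty : PySem.Dict Int Nat).values = [] := by
    simp [PySem.Dict.values, hitems]
  have hep : PairsOk matrix lst PySem.Dict.empty := by
    intro p hp
    rw [hitems] at hp
    cases hp
  obtain ⟨part1, part2⟩ := kuhnLoop_spec matrix lst (matrix.flatten.length + 1) hfuel
    (List.range matrix.length) PySem.Dict.empty hek (by rw [hev]; exact List.nodup_nil) hep
    (fun i hi => List.mem_range.1 hi) (List.nodup_range)
    (fun i _ hmem => by rw [hev] at hmem; cases hmem)
  constructor
  · intro h
    obtain ⟨M', hk', hp', hcov, -⟩ := part1 h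
    have hkeysnd : (M'.items.map Prod.fst).Nodup := by simpa only [PySem.Dict.keys] using hk'
    set f : Nat → Int := fun r => (((M'.items.find? (fun p => p.2 == r)).map Prod.fst).getD 0) with hf
    have hkey : ∀ r, r ∈ M'.values → (f r, r) ∈ M'.items := by
      intro r hr
      have hex : ∃ q ∈ M'.items, (fun p : Int × Nat => p.2 == r) q = true := by
        have : r ∈ M'.items.map Prod.snd := by simpa [PySem.Dict.values] using hr
        obtain ⟨q, hq, hq2⟩ := List.mem_map.1 this
        exact ⟨q, hq, by simp [hq2]⟩
      obtain ⟨q, hfind⟩ := Option.isSome_iff_exists.1 (List.find?_isSome.2 hex)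
      have hqmem := List.mem_of_find?_eq_some hfind
      have hq2 : q.2 = r := by simpa using List.find?_some hfind
      have hfr : f r = q.1 := by simp [hf, hfind]
      rw [hfr, ← hq2]
      exact hqmem
    have hcov' : ∀ r, r < matrix.length → (f r, r) ∈ M'.items := by
      intro r hr
      exact hkey r (hcov r (List.mem_range.2 hr))
    refine ⟨(List.range matrix.length).map f, by simp, ?_, ?_, ?_⟩
    · apply List.Nodup.map_on ?_ List.nodup_range
      intro x hx y hy heq
      have hpx := hcov' x (List.mem_range.1 hx)
      have hpy := hcov' y (List.mem_range.1 hy)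
      have := List.inj_on_of_nodup_map hkeysnd hpx hpy heq
      exact (Prod.mk.injEq .. ▸ this).2
    · intro v hv
      obtain ⟨r, hr, rfl⟩ := List.mem_map.1 hv
      exact (hp' _ (hcov' r (List.mem_range.1 hr))).2.1
    · intro r hr
      have hlt : r < ((List.range matrix.length).map f).length := by simpa using hr
      rw [List.getD_eq_getElem _ 0 hlt]
      simp only [List.getElem_map, List.getElem_range]
      exact (hp' _ (hcov' r hr)).1
  · intro hg
    exact part2 hg

-- ===== VERDICT (by name: the statement is the Claim_ definition above) =====
theorem check_matrix_spec : Claim_equal_check_matrix := by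
  intro matrix lst _ hpre
  unfold Spec_check_matrix
  have h1 := check_matrix_iff matrix lst hpre
  have h2 := alt_iff matrix lst
  have h3 := sdr_iff_gsdr matrix lst
  cases hA : check_matrix matrix lst <;> cases hB : check_matrix_alt matrix lst <;> simp_all
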